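-- pv_equiv track=rewrite | github.com/myeongHeonn/Algorithm | 프로그래머스/1/12982. 예산/예산.py | solution
-- ===== SOURCE A (Python) =====
-- def solution(d, budget):
--     answer = 0
--     d.sort()
--
--     for request in d:
--         if request <= budget:
--             answer += 1
--             budget -= request
--
--     return answer
-- ===== SOURCE B (Python) =====
-- def solution(d, budget):
--     d.sort()  # keep A's in-place mutation
--     # pass 1: prefix-sum table of the sorted list
--     prefix = []
--     s = 0
--     for x in d:
--         s += x
--         prefix.append(s)
--     # pass 2: count leading prefix sums that fit in the budget
--     k = 0
--     while k < len(prefix) and prefix[k] <= budget: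
--         k += 1
--     return k
-- ===== Notes on version B (the rewrite author's own statement) =====
-- stated objective: alternative
-- what changed: Replaces the threaded remaining-budget accumulator with an explicit prefix-sum table over the sorted list followed by a pass counting the leading prefix sums that are <= budget.
import Mathlib
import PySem

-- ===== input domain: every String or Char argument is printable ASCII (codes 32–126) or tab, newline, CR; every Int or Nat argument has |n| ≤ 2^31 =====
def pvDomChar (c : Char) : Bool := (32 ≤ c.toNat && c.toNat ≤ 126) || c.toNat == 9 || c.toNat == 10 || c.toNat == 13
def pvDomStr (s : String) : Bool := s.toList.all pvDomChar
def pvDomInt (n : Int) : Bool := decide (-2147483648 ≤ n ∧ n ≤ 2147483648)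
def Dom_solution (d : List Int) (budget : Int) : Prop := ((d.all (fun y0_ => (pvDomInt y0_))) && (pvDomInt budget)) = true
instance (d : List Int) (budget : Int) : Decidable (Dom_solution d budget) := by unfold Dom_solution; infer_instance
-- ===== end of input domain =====

-- B replaces A's running remaining-budget accumulator with a prefix-sum table plus a counting
-- pass; both programs sort the argument in place (the equivalence proved is about the return value,
-- and both perform the same mutation).

-- ===== PORT A =====
-- A: sort, then greedily take each request that still fits, decrementing the budget.
def solution (d : List Int) (budget : Int) : Int :=
  let ds := PySem.List.sorted d (fun x => x) false
  (ds.foldl (fun (st : Int × Int) request =>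
      if request ≤ st.2 then (st.1 + 1, st.2 - request) else st) (0, budget)).1

-- ===== PORT B =====
-- B pass 1: build the prefix-sum table of the sorted list (fold carrying the list and running sum).
def pvPrefixFold (ds : List Int) : List Int :=
  (ds.foldl (fun (st : List Int × Int) x =>
      let s := st.2 + x; (st.1 ++ [s], s)) ([], 0)).1

-- B pass 2: the while loop counting leading prefix sums ≤ budget (stops at the first that exceeds).
def pvCountLeq (ps : List Int) (budget : Int) : Int :=
  match ps with
  | [] => 0
  | p :: rest => if p ≤ budget then 1 + pvCountLeq rest budget else 0

def solution_alt (d : List Int) (budget : Int) : Int :=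
  let ds := PySem.List.sorted d (fun x => x) false
  pvCountLeq (pvPrefixFold ds) budget

-- ===== PRECONDITION & SPEC =====
def Spec_solution (d : List Int) (budget : Int) (out : Int) : Prop := out = solution_alt d budget
instance (d : List Int) (budget : Int) (out : Int) : Decidable (Spec_solution d budget out) := by unfold Spec_solution; infer_instance

-- ===== CLAIM =====
def Claim_equal_solution : Prop := ∀ (d : List Int) (budget : Int), Dom_solution d budget → Spec_solution d budget (solution d budget)

-- ===== LEMMAS AND PROOFS =====

-- prefix sums of ds starting from running total s
def pvPrefixFrom (ds : List Int) (s : Int) : List Int :=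
  match ds with
  | [] => []
  | x :: t => (s + x) :: pvPrefixFrom t (s + x)

theorem pvPrefixFold_gen (ds : List Int) (acc : List Int) (s : Int) :
    (ds.foldl (fun (st : List Int × Int) x =>
      let s := st.2 + x; (st.1 ++ [s], s)) (acc, s)).1 = acc ++ pvPrefixFrom ds s := by
  induction ds generalizing acc s with
  | nil => simp [pvPrefixFrom]
  | cons x t ih => simp [List.foldl, pvPrefixFrom, ih]

theorem pvPrefixFold_eq (ds : List Int) : pvPrefixFold ds = pvPrefixFrom ds 0 := by
  simpa using pvPrefixFold_gen ds [] 0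

-- once a request exceeds the remaining budget, a sorted tail changes nothing
theorem pvGreedy_stuck (ds : List Int) (a b x : Int)
    (hall : ∀ y ∈ ds, x ≤ y) (hx : ¬ x ≤ b) :
    (ds.foldl (fun (st : Int × Int) request =>
      if request ≤ st.2 then (st.1 + 1, st.2 - request) else st) (a, b)) = (a, b) := by
  induction ds with
  | nil => rfl
  | cons y t ih =>
    have hy : ¬ y ≤ b := fun h => hx (le_trans (hall y (by simp)) h)
    simp only [List.foldl, if_neg hy]
    exact ih (fun z hz => hall z (by simp [hz]))

-- main invariant: greedy over a sorted list counts the leading prefix sums ≤ budget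
theorem pvGreedy_eq_count (ds : List Int) (hsort : ds.Pairwise (· ≤ ·)) (a s budget : Int) :
    (ds.foldl (fun (st : Int × Int) request =>
      if request ≤ st.2 then (st.1 + 1, st.2 - request) else st) (a, budget - s)).1
      = a + pvCountLeq (pvPrefixFrom ds s) budget := by
  induction ds generalizing a s with
  | nil => simp [pvPrefixFrom, pvCountLeq]
  | cons x t ih =>
    rcases List.pairwise_cons.mp hsort with ⟨hx, ht⟩
    by_cases h : s + x ≤ budget
    · have hx' : x ≤ budget - s := by omega
      simp only [List.foldl, if_pos hx', pvPrefixFrom, pvCountLeq, if_pos h]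
      have : budget - s - x = budget - (s + x) := by ring
      rw [this, ih ht (a + 1) (s + x)]
      ring
    · have hx' : ¬ x ≤ budget - s := by omega
      simp only [List.foldl, if_neg hx', pvPrefixFrom, pvCountLeq, if_neg h]
      rw [pvGreedy_stuck t a (budget - s) x hx hx']
      simp

-- ===== VERDICT =====
theorem solution_spec : Claim_equal_solution := by
  intro d budget _
  simp only [Spec_solution, solution, solution_alt, pvPrefixFold_eq]
  have h := pvGreedy_eq_count (PySem.List.sorted d (fun x => x) false)
    (by simpa using PySem.List.sorted_pairwise d (fun x => x)) 0 0 budget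
  simpa using h
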